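-- pv_equiv track=rewrite | github.com/LukaBerkers/aoc18_py | day_2.py | count_box_ids_containing_a_letter_two_and_three_times
-- ===== SOURCE A (Python) =====
-- def count_box_ids_containing_a_letter_two_and_three_times(box_ids: list[str]) -> tuple[int, int]:
--     """
--     Finds how many box IDs have any letter twice and how many box IDs have any letter three times.
--
--     Args:
--         box_ids: A list of strings representing box IDs.
--
--     Returns:
--         A tuple containing the count of box IDs that have any letter exactly twice and the count of
--         box IDs that have any letter exactly three times.
--     """
--     id_has_a_letter_two_times_count = 0
--     id_has_a_letter_three_times_count = 0
--
--     for box_id in box_ids: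
--         letter_frequencies = dict[str, int]()
--
--         for letter in box_id:
--             if letter not in letter_frequencies:
--                 letter_frequencies[letter] = 1
--             else:
--                 letter_frequencies[letter] += 1
--
--         if 2 in letter_frequencies.values():
--             id_has_a_letter_two_times_count += 1
--         if 3 in letter_frequencies.values():
--             id_has_a_letter_three_times_count += 1
--
--     return id_has_a_letter_two_times_count, id_has_a_letter_three_times_count
-- ===== SOURCE B (Python) =====
-- def count_box_ids_containing_a_letter_two_and_three_times(box_ids: list[str]) -> tuple[int, int]:
--     twos = 0
--     threes = 0
--     for box_id in box_ids:
--         has_two = False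
--         has_three = False
--         run = 0
--         prev = None
--         for ch in sorted(box_id):
--             if prev == ch:
--                 run += 1
--             else:
--                 if run == 2:
--                     has_two = True
--                 if run == 3:
--                     has_three = True
--                 run = 1
--                 prev = ch
--         if run == 2:
--             has_two = True
--         if run == 3:
--             has_three = True
--         if has_two:
--             twos += 1
--         if has_three:
--             threes += 1
--     return twos, threes
-- ===== Notes on version B (the rewrite author's own statement) =====
-- stated objective: alternative
-- what changed: Replaces the per-id letter-frequency dict and its values() scan with sorting each id's characters and a single run-length scan over the sorted sequence, setting flags when a run of length 2 or 3 ends; no frequency map is ever built.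
import Mathlib
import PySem

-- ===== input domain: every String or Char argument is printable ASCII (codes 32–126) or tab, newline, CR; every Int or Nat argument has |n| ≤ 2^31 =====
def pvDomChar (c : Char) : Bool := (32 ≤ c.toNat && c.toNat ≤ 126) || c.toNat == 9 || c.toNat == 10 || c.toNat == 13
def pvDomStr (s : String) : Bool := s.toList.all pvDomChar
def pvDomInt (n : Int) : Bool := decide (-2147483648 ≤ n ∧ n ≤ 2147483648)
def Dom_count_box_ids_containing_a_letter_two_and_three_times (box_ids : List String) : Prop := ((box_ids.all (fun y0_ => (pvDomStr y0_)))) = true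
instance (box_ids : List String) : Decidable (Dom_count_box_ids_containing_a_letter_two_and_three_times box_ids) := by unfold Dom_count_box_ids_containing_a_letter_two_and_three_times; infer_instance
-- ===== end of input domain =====

-- B sorts each id's characters and does a single run-length scan over the sorted
-- sequence (flags set when a run of length 2 or 3 ends) instead of building a
-- letter-frequency dict and scanning its values; objective: alternative.

-- ===== PORT A =====
def count_box_ids_containing_a_letter_two_and_three_times (box_ids : List String) : Int × Int :=
  box_ids.foldl (fun acc box_id =>
    let letter_frequencies : PySem.Dict Char Int :=
      box_id.toList.foldl (fun d letter =>
        if ¬ d.contains letter then d.insert letter 1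
        else d.insert letter (d.getD letter 0 + 1)) PySem.Dict.empty
    let twos := if (2 : Int) ∈ letter_frequencies.values then acc.1 + 1 else acc.1
    let threes := if (3 : Int) ∈ letter_frequencies.values then acc.2 + 1 else acc.2
    (twos, threes)) (0, 0)

-- ===== PORT B =====
-- the inner loop body of Source B: state (has_two, has_three, run, prev)
def pvScanStep (st : Bool × Bool × Int × Option Char) (ch : Char) : Bool × Bool × Int × Option Char :=
  if st.2.2.2 == some ch then (st.1, st.2.1, st.2.2.1 + 1, st.2.2.2)
  else (st.1 || st.2.2.1 == 2, st.2.1 || st.2.2.1 == 3, 1, some ch)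

def count_box_ids_containing_a_letter_two_and_three_times_alt (box_ids : List String) : Int × Int :=
  box_ids.foldl (fun acc box_id =>
    let st := (PySem.List.sorted box_id.toList (fun c => c) false).foldl pvScanStep
                (false, false, (0 : Int), (none : Option Char))
    let has_two := st.1 || st.2.2.1 == 2
    let has_three := st.2.1 || st.2.2.1 == 3
    let twos := if has_two then acc.1 + 1 else acc.1
    let threes := if has_three then acc.2 + 1 else acc.2
    (twos, threes)) (0, 0)

-- ===== PRECONDITION & SPEC =====
def Spec_count_box_ids_containing_a_letter_two_and_three_times (box_ids : List String) (out : Int × Int) : Prop := out = count_box_ids_containing_a_letter_two_and_three_times_alt box_ids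
instance (box_ids : List String) (out : Int × Int) : Decidable (Spec_count_box_ids_containing_a_letter_two_and_three_times box_ids out) := by unfold Spec_count_box_ids_containing_a_letter_two_and_three_times; infer_instance

-- ===== CLAIM (what is proved, stated in full; the proofs are below) =====
def Claim_equal_count_box_ids_containing_a_letter_two_and_three_times : Prop := ∀ (box_ids : List String), Dom_count_box_ids_containing_a_letter_two_and_three_times box_ids → Spec_count_box_ids_containing_a_letter_two_and_three_times box_ids (count_box_ids_containing_a_letter_two_and_three_times box_ids)

-- ===== LEMMAS AND PROOFS =====

-- A's dict-building step is the standard counter step (in the new-key branch getD is 0).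
theorem pv_step_eq (d : PySem.Dict Char Int) (c : Char) :
    (if ¬ d.contains c then d.insert c 1 else d.insert c (d.getD c 0 + 1))
      = d.insert c (d.getD c 0 + 1) := by
  by_cases h : d.contains c
  · simp [h]
  · simp [h, PySem.Dict.getD_of_not_contains d 0 (by simpa using h)]

-- A's per-id frequency dict is Counter(box_id).
theorem pv_dict_eq_counter (cs : List Char) :
    cs.foldl (fun d letter =>
        if ¬ d.contains letter then d.insert letter 1
        else d.insert letter (d.getD letter 0 + 1)) PySem.Dict.empty
      = PySem.Dict.counter cs := by
  rw [← PySem.Dict.foldl_insert_getD_add_one_eq_counter]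
  exact PySem.List.foldl_congr_mem _ _ _ _ (fun d c _ => pv_step_eq d c)

-- A's values() membership test is "some letter occurs exactly v times".
theorem pv_values_mem (cs : List Char) (v : Int) :
    ((v ∈ (PySem.Dict.counter cs).values) ↔ (∃ d ∈ cs, (cs.count d : Int) = v)) := by
  rw [PySem.Dict.values_eq_map_keys _ (PySem.Dict.nodup_keys_counter cs) 0]
  simp only [List.mem_map, PySem.Dict.keys_counter, PySem.Dict.getD_counter]
  constructor
  · rintro ⟨d, hd, hv⟩
    exact ⟨d, by simpa [PySem.List.mem_dedup] using hd, hv⟩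
  · rintro ⟨d, hd, hv⟩
    exact ⟨d, by simpa [PySem.List.mem_dedup] using hd, hv⟩

-- the final flush of Source B's inner loop
def pvFlush (st : Bool × Bool × Int × Option Char) : Bool × Bool :=
  (st.1 || st.2.2.1 == 2, st.2.1 || st.2.2.1 == 3)

-- Run-length scan invariant: scanning a sorted tail s with a pending run of n copies
-- of c (c ≤ everything in s) flushes to "old flag ∨ the run of c ends at 2/3 ∨ some
-- other letter's run in s has length 2/3".
theorem pv_scan_run (s : List Char) (c : Char) (n : Int) (h2 h3 : Bool)
    (hs : (c :: s).Pairwise (· ≤ ·)) :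
    pvFlush (s.foldl pvScanStep (h2, h3, n, some c))
      = (h2 || decide ((n + s.count c : Int) = 2) || decide (∃ d ∈ s, d ≠ c ∧ (s.count d : Int) = 2),
         h3 || decide ((n + s.count c : Int) = 3) || decide (∃ d ∈ s, d ≠ c ∧ (s.count d : Int) = 3)) := by
  induction s generalizing c n h2 h3 with
  | nil => simp [pvFlush, Bool.beq_eq_decide_eq]
  | cons x t ih =>
    rcases List.pairwise_cons.1 hs with ⟨hcle, hxt⟩
    rcases List.pairwise_cons.1 hxt with ⟨hxle, _⟩
    by_cases hxc : x = c
    · subst hxc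
      have hstep : pvScanStep (h2, h3, n, some x) x = (h2, h3, n + 1, some x) := by
        simp only [pvScanStep, beq_self_eq_true, if_true]
      rw [List.foldl_cons, hstep, ih x (n + 1) h2 h3 hxt, Prod.mk.injEq]
      have hq : ∀ (b : Bool) (v : Int),
          (b || decide ((n + 1 + t.count x : Int) = v) || decide (∃ d ∈ t, d ≠ x ∧ (t.count d : Int) = v))
            = (b || decide ((n + (x :: t).count x : Int) = v) ||
               decide (∃ d ∈ x :: t, d ≠ x ∧ ((x :: t).count d : Int) = v)) := by
        intro b v
        have e1 : ((n + 1 + t.count x : Int) = v) ↔ ((n + (x :: t).count x : Int) = v) := by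
          rw [List.count_cons_self]; push_cast; constructor <;> intro h <;> omega
        have e2 : (∃ d ∈ t, d ≠ x ∧ (t.count d : Int) = v)
            ↔ (∃ d ∈ x :: t, d ≠ x ∧ ((x :: t).count d : Int) = v) := by
          constructor
          · rintro ⟨d, hd, hne, hv⟩
            exact ⟨d, List.mem_cons_of_mem _ hd, hne,
              by rwa [List.count_cons_of_ne (Ne.symm hne)]⟩
          · rintro ⟨d, hd, hne, hv⟩
            rcases List.mem_cons.1 hd with rfl | hd
            · exact absurd rfl hne
            · exact ⟨d, hd, hne, by rwa [List.count_cons_of_ne (Ne.symm hne)] at hv⟩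
        simp only [e1, e2]
      exact ⟨hq h2 2, hq h3 3⟩
    · have hcx : c < x := lt_of_le_of_ne (hcle x (List.mem_cons_self)) (fun h => hxc h.symm)
      have hcnot : c ∉ x :: t := by
        intro hmem
        rcases List.mem_cons.1 hmem with rfl | hmem
        · exact hxc rfl
        · exact absurd (hxle c hmem) (not_le.2 hcx)
      have hcount0 : (x :: t).count c = 0 := List.count_eq_zero.2 hcnot
      have hstep : pvScanStep (h2, h3, n, some c) x
          = (h2 || n == 2, h3 || n == 3, 1, some x) := by
        have hff : ((some c : Option Char) == some x) = false := by
          simpa using (show c ≠ x from fun h => hxc h.symm)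
        simp [pvScanStep, hff]
      rw [List.foldl_cons, hstep, ih x 1 _ _ hxt, Prod.mk.injEq]
      have hq : ∀ (b : Bool) (v : Int),
          ((b || (n == v)) || decide ((1 + t.count x : Int) = v) || decide (∃ d ∈ t, d ≠ x ∧ (t.count d : Int) = v))
            = (b || decide ((n + (x :: t).count c : Int) = v) ||
               decide (∃ d ∈ x :: t, d ≠ c ∧ ((x :: t).count d : Int) = v)) := by
        intro b v
        have hrun : (decide ((n + (x :: t).count c : Int) = v)) = (n == v) := by
          rw [hcount0, Bool.beq_eq_decide_eq]
          exact decide_eq_decide.2 (by push_cast; constructor <;> intro h <;> omega)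
        have hex : (∃ d ∈ x :: t, d ≠ c ∧ ((x :: t).count d : Int) = v)
            ↔ (((1 + t.count x : Int) = v) ∨ ∃ d ∈ t, d ≠ x ∧ (t.count d : Int) = v) := by
          constructor
          · rintro ⟨d, hd, hne, hv⟩
            rcases List.mem_cons.1 hd with rfl | hd
            · left; rw [List.count_cons_self] at hv; push_cast at hv ⊢; omega
            · by_cases hdx : d = x
              · subst hdx
                left; rw [List.count_cons_self] at hv; push_cast at hv ⊢; omega
              · right
                exact ⟨d, hd, hdx, by rwa [List.count_cons_of_ne (Ne.symm hdx)] at hv⟩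
          · rintro (hv | ⟨d, hd, hne, hv⟩)
            · refine ⟨x, List.mem_cons_self, fun h => hxc h, ?_⟩
              rw [List.count_cons_self]; push_cast at hv ⊢; omega
            · have hdc : d ≠ c := by
                intro h; subst h; exact hcnot (List.mem_cons_of_mem _ hd)
              exact ⟨d, List.mem_cons_of_mem _ hd, hdc,
                by rwa [List.count_cons_of_ne (Ne.symm hne)]⟩
        rw [hrun]
        simp only [hex]
        cases b <;> cases hn : (n == v) <;>
          simp [Bool.decide_or, Bool.or_comm]
      exact ⟨hq h2 2, hq h3 3⟩

-- Per-string: Source B's sorted run-length scan computes exactly the two membership facts.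
theorem pv_scan_string (cs : List Char) :
    pvFlush (((PySem.List.sorted cs (fun c => c) false)).foldl pvScanStep (false, false, 0, none))
      = (decide (∃ d ∈ cs, (cs.count d : Int) = 2), decide (∃ d ∈ cs, (cs.count d : Int) = 3)) := by
  have hperm : (PySem.List.sorted cs (fun c => c) false).Perm cs := PySem.List.sorted_perm cs _ _
  have hpair : (PySem.List.sorted cs (fun c => c) false).Pairwise (· ≤ ·) := by
    simpa using PySem.List.sorted_pairwise cs (fun c => c)
  have hmem : ∀ v : Int, (∃ d ∈ cs, (cs.count d : Int) = v)
      ↔ (∃ d ∈ (PySem.List.sorted cs (fun c => c) false),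
          (((PySem.List.sorted cs (fun c => c) false)).count d : Int) = v) := by
    intro v
    constructor
    · rintro ⟨d, hd, hv⟩
      exact ⟨d, hperm.mem_iff.2 hd, by rw [hperm.count_eq]; exact hv⟩
    · rintro ⟨d, hd, hv⟩
      exact ⟨d, hperm.mem_iff.1 hd, by rw [← hperm.count_eq]; exact hv⟩
  rcases hsort : PySem.List.sorted cs (fun c => c) false with _ | ⟨x, t⟩
  · have : cs = [] := (PySem.List.sorted_eq_nil_iff _ _ _).1 hsort
    subst this
    simp [pvFlush]
  · rw [hsort] at hpair hmem
    rcases List.pairwise_cons.1 hpair with ⟨hxle, hxt⟩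
    have hstep : pvScanStep (false, false, 0, none) x = (false, false, 1, some x) := by
      simp only [pvScanStep]
      rfl
    rw [List.foldl_cons, hstep, pv_scan_run t x 1 false false hpair, Prod.mk.injEq]
    have hq : ∀ v : Int,
        ((false : Bool) || decide ((1 + t.count x : Int) = v) || decide (∃ d ∈ t, d ≠ x ∧ (t.count d : Int) = v))
          = decide (∃ d ∈ cs, (cs.count d : Int) = v) := by
      intro v
      simp only [hmem v]
      have hex : (∃ d ∈ x :: t, (((x :: t) : List Char).count d : Int) = v)
          ↔ (((1 + t.count x : Int) = v) ∨ ∃ d ∈ t, d ≠ x ∧ (t.count d : Int) = v) := by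
        constructor
        · rintro ⟨d, hd, hv⟩
          by_cases hdx : d = x
          · subst hdx
            left; rw [List.count_cons_self] at hv; push_cast at hv ⊢; omega
          · rcases List.mem_cons.1 hd with rfl | hd
            · exact absurd rfl hdx
            · right; exact ⟨d, hd, hdx, by rwa [List.count_cons_of_ne (Ne.symm hdx)] at hv⟩
        · rintro (hv | ⟨d, hd, hne, hv⟩)
          · refine ⟨x, List.mem_cons_self, ?_⟩
            rw [List.count_cons_self]; push_cast at hv ⊢; omega
          · exact ⟨d, List.mem_cons_of_mem _ hd,
              by rwa [List.count_cons_of_ne (Ne.symm hne)]⟩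
      simp only [hex]
      simp [Bool.decide_or]
    exact ⟨hq 2, hq 3⟩

-- ===== VERDICT (by name: the statement is the Claim_ definition above) =====
theorem count_box_ids_containing_a_letter_two_and_three_times_spec : Claim_equal_count_box_ids_containing_a_letter_two_and_three_times := by
  intro box_ids _
  unfold Spec_count_box_ids_containing_a_letter_two_and_three_times
  unfold count_box_ids_containing_a_letter_two_and_three_times
  unfold count_box_ids_containing_a_letter_two_and_three_times_alt
  apply PySem.List.foldl_congr_mem
  intro acc s _
  have hA2 := pv_values_mem s.toList 2
  have hA3 := pv_values_mem s.toList 3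
  have hB := pv_scan_string s.toList
  simp only [pv_dict_eq_counter]
  have h2 : ((2 : Int) ∈ (PySem.Dict.counter s.toList).values)
      = (pvFlush ((PySem.List.sorted s.toList (fun c => c) false).foldl pvScanStep (false, false, 0, none))).1 := by
    rw [hB]; simp [hA2]
  have h3 : ((3 : Int) ∈ (PySem.Dict.counter s.toList).values)
      = (pvFlush ((PySem.List.sorted s.toList (fun c => c) false).foldl pvScanStep (false, false, 0, none))).2 := by
    rw [hB]; simp [hA3]
  simp only [pvFlush] at h2 h3
  simp only [h2, h3]
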